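-- pv_equiv track=rewrite | github.com/vamsikrishna-01/email-phising-detector | detector/urgent_language_rule.py | _contains_threatening_language
-- ===== SOURCE A (Python) =====
-- def _contains_threatening_language(text: str) -> bool:
--     """Check for language that threatens negative consequences."""
--     threatening_phrases = [
--         'your account will be closed', 'your account will be suspended',
--         'your account will be terminated', 'your account will be restricted',
--         'your account will be limited', 'your account will be flagged',
--         'your account will be blocked', 'your account will be disabled',
--         'your account will be deactivated', 'your account will be hacked',
--         'your account will be breached', 'your account will be accessed',
--         'your account will be compromised', 'your account will be locked',
--         'your account will be suspended for security reasons',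
--         'your account will be terminated for security reasons',
--         'your account will be restricted for security reasons',
--         'your account will be limited for security reasons',
--         'your account will be flagged for security reasons',
--         'your account will be blocked for security reasons',
--         'your account will be disabled for security reasons',
--         'your account will be deactivated for security reasons',
--         'your account will be hacked for security reasons',
--         'your account will be breached for security reasons',
--         'your account will be accessed for security reasons',
--         'your account will be compromised for security reasons',
--         'your account will be locked for security reasons',
--         'your account has been closed', 'your account has been suspended',
--         'your account has been terminated', 'your account has been restricted',
--         'your account has been limited', 'your account has been flagged',
--         'your account has been blocked', 'your account has been disabled',
--         'your account has been deactivated', 'your account has been hacked',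
--         'your account has been breached', 'your account has been accessed',
--         'your account has been compromised', 'your account has been locked',
--         'your account has been suspended for security reasons',
--         'your account has been terminated for security reasons',
--         'your account has been restricted for security reasons',
--         'your account has been limited for security reasons',
--         'your account has been flagged for security reasons',
--         'your account has been blocked for security reasons',
--         'your account has been disabled for security reasons',
--         'your account has been deactivated for security reasons',
--         'your account has been hacked for security reasons',
--         'your account has been breached for security reasons',
--         'your account has been accessed for security reasons',
--         'your account has been compromised for security reasons',
--         'your account has been locked for security reasons'
--     ]
--
--     return any(phrase in text.lower() for phrase in threatening_phrases)
-- ===== SOURCE B (Python) =====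
-- _VERBS = ('closed', 'suspended', 'terminated', 'restricted', 'limited',
--           'flagged', 'blocked', 'disabled', 'deactivated', 'hacked',
--           'breached', 'accessed', 'compromised', 'locked')
--
-- _WILL = 'your account will be '
-- _HAS = 'your account has been '
--
--
-- def _contains_threatening_language(text: str) -> bool:
--     """Check for language that threatens negative consequences.
--
--     Single left-to-right scan over the lowered text: at each position try
--     to parse lead + tense + threatening verb.  This is exact because every
--     long suffixed phrase of the original list begins with its base phrase.
--     """
--     lowered = text.lower()
--     for i in range(len(lowered)):
--         if lowered.startswith(_WILL, i):
--             j = i + len(_WILL)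
--         elif lowered.startswith(_HAS, i):
--             j = i + len(_HAS)
--         else:
--             continue
--         if lowered.startswith(_VERBS, j):
--             return True
--     return False
-- ===== Notes on version B (the rewrite author's own statement) =====
-- stated objective: alternative
-- what changed: Replaces 42 independent full-text substring searches with one left-to-right scan that at each position parses the threat grammar (account lead, then one of two tenses, then a threatening verb); the 14 redundant long suffixed phrases disappear since each begins with its base phrase.
import Mathlib
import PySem

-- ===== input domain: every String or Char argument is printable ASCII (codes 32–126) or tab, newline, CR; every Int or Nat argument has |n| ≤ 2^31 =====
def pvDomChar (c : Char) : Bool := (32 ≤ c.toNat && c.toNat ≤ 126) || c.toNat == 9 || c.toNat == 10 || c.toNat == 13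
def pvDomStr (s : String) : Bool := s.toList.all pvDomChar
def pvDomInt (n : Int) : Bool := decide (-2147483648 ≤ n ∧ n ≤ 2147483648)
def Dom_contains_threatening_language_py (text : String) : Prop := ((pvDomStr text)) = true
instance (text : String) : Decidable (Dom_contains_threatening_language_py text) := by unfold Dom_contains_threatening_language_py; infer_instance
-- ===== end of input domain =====

-- B replaces A's 42 independent full-text substring searches by ONE left-to-right
-- scan that, at each position, parses 'your account ' + ('will be '|'has been ')
-- + verb; exact since every long suffixed phrase begins with its base phrase.
-- Objective: alternative (a different algorithm of similar cost).

-- ===== PORT A =====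
def pvPhrasesA : List String := [
  "your account will be closed", "your account will be suspended",
  "your account will be terminated", "your account will be restricted",
  "your account will be limited", "your account will be flagged",
  "your account will be blocked", "your account will be disabled",
  "your account will be deactivated", "your account will be hacked",
  "your account will be breached", "your account will be accessed",
  "your account will be compromised", "your account will be locked",
  "your account will be suspended for security reasons",
  "your account will be terminated for security reasons",
  "your account will be restricted for security reasons",
  "your account will be limited for security reasons",
  "your account will be flagged for security reasons",
  "your account will be blocked for security reasons",
  "your account will be disabled for security reasons",
  "your account will be deactivated for security reasons",
  "your account will be hacked for security reasons",
  "your account will be breached for security reasons",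
  "your account will be accessed for security reasons",
  "your account will be compromised for security reasons",
  "your account will be locked for security reasons",
  "your account has been closed", "your account has been suspended",
  "your account has been terminated", "your account has been restricted",
  "your account has been limited", "your account has been flagged",
  "your account has been blocked", "your account has been disabled",
  "your account has been deactivated", "your account has been hacked",
  "your account has been breached", "your account has been accessed",
  "your account has been compromised", "your account has been locked",
  "your account has been suspended for security reasons",
  "your account has been terminated for security reasons",
  "your account has been restricted for security reasons",
  "your account has been limited for security reasons",
  "your account has been flagged for security reasons",
  "your account has been blocked for security reasons",
  "your account has been disabled for security reasons",
  "your account has been deactivated for security reasons",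
  "your account has been hacked for security reasons",
  "your account has been breached for security reasons",
  "your account has been accessed for security reasons",
  "your account has been compromised for security reasons",
  "your account has been locked for security reasons"]

def contains_threatening_language_py (text : String) : Bool :=
  pvPhrasesA.any (fun phrase => PySem.Str.isIn phrase (PySem.Str.lower text))

-- ===== PORT B =====
def pvVerbsB : List String := ["closed", "suspended", "terminated", "restricted",
  "limited", "flagged", "blocked", "disabled", "deactivated", "hacked",
  "breached", "accessed", "compromised", "locked"]

def pvWillB : List Char := "your account will be ".toList
def pvHasB : List Char := "your account has been ".toList

-- Source B loop body at position i (startswith at offset i = prefix of the suffix)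
def pvHitB (s : List Char) : Bool :=
  if pvWillB.isPrefixOf s then
    pvVerbsB.any (fun v => v.toList.isPrefixOf (s.drop 21))
  else if pvHasB.isPrefixOf s then
    pvVerbsB.any (fun v => v.toList.isPrefixOf (s.drop 22))
  else false

-- Source B's 'for i in range(len(lowered))': the offsets i enumerate the suffixes
def pvScanB : List Char → Bool
  | [] => false
  | c :: rest => pvHitB (c :: rest) || pvScanB rest

def contains_threatening_language_py_alt (text : String) : Bool :=
  pvScanB (PySem.Str.lower text).toList

-- ===== PRECONDITION & SPEC =====
def Spec_contains_threatening_language_py (text : String) (out : Bool) : Prop := out = contains_threatening_language_py_alt text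
instance (text : String) (out : Bool) : Decidable (Spec_contains_threatening_language_py text out) := by unfold Spec_contains_threatening_language_py; infer_instance

-- ===== CLAIM (what is proved, stated in full; the proofs are below) =====
def Claim_equal_contains_threatening_language_py : Prop := ∀ (text : String), Dom_contains_threatening_language_py text → Spec_contains_threatening_language_py text (contains_threatening_language_py text)

-- ===== LEMMAS AND PROOFS =====

-- (a ++ b) is a prefix of s iff a is, and b is a prefix of what remains
theorem pvPrefix_append_iff {α : Type} (a b s : List α) :
    (a ++ b) <+: s ↔ a <+: s ∧ b <+: s.drop a.length := by
  constructor
  · rintro ⟨t, rfl⟩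
    refine ⟨⟨b ++ t, by simp⟩, ?_⟩
    rw [List.append_assoc, List.drop_left]
    exact ⟨t, rfl⟩
  · rintro ⟨⟨u, rfl⟩, hb⟩
    rw [List.drop_left] at hb
    obtain ⟨t, rfl⟩ := hb
    exact ⟨t, by simp⟩

-- pvHitB holds exactly when some base phrase (lead ++ verb) is a prefix of s
theorem pvHitB_iff (s : List Char) :
    pvHitB s = true ↔
      (∃ v ∈ pvVerbsB, (pvWillB ++ v.toList) <+: s) ∨
      (∃ v ∈ pvVerbsB, (pvHasB ++ v.toList) <+: s) := by
  have hwl : pvWillB.length = 21 := by decide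
  have hhl : pvHasB.length = 22 := by decide
  have hexcl : ∀ {t : List Char}, pvWillB <+: t → pvHasB <+: t → False := by
    intro t h1 h2
    rcases List.prefix_or_prefix_of_prefix h1 h2 with h | h
    · exact absurd h (by decide)
    · exact absurd h (by decide)
  unfold pvHitB
  split_ifs with h1 h2
  · rw [List.isPrefixOf_iff_prefix] at h1
    simp only [List.any_eq_true, List.isPrefixOf_iff_prefix]
    constructor
    · rintro ⟨v, hv, hp⟩
      exact Or.inl ⟨v, hv, (pvPrefix_append_iff _ _ _).mpr ⟨h1, by rw [hwl]; exact hp⟩⟩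
    · rintro (⟨v, hv, hp⟩ | ⟨v, hv, hp⟩)
      · obtain ⟨-, hp⟩ := (pvPrefix_append_iff _ _ _).mp hp
        exact ⟨v, hv, by rw [hwl] at hp; exact hp⟩
      · exact absurd (((pvPrefix_append_iff _ _ _).mp hp).1) (fun h => hexcl h1 h)
  · rw [List.isPrefixOf_iff_prefix] at h2
    rw [List.isPrefixOf_iff_prefix] at h1
    simp only [List.any_eq_true, List.isPrefixOf_iff_prefix]
    constructor
    · rintro ⟨v, hv, hp⟩
      exact Or.inr ⟨v, hv, (pvPrefix_append_iff _ _ _).mpr ⟨h2, by rw [hhl]; exact hp⟩⟩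
    · rintro (⟨v, hv, hp⟩ | ⟨v, hv, hp⟩)
      · exact absurd (((pvPrefix_append_iff _ _ _).mp hp).1) h1
      · obtain ⟨-, hp⟩ := (pvPrefix_append_iff _ _ _).mp hp
        exact ⟨v, hv, by rw [hhl] at hp; exact hp⟩
  · rw [List.isPrefixOf_iff_prefix] at h1 h2
    simp only [false_iff]
    rintro (⟨v, hv, hp⟩ | ⟨v, hv, hp⟩)
    · exact h1 ((pvPrefix_append_iff _ _ _).mp hp).1
    · exact h2 ((pvPrefix_append_iff _ _ _).mp hp).1

-- the scan succeeds iff the parse succeeds at some suffix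
theorem pvScanB_iff (l : List Char) :
    pvScanB l = true ↔ ∃ s, s <:+ l ∧ pvHitB s = true := by
  induction l with
  | nil =>
    simp only [pvScanB, Bool.false_eq_true, false_iff]
    rintro ⟨s, hs, hhit⟩
    rw [List.suffix_nil.mp hs] at hhit
    exact absurd hhit (by decide)
  | cons c rest ih =>
    simp only [pvScanB, Bool.or_eq_true, ih]
    constructor
    · rintro (h | ⟨s, hs, hhit⟩)
      · exact ⟨c :: rest, List.suffix_refl _, h⟩
      · exact ⟨s, hs.trans (List.suffix_cons c rest), hhit⟩
    · rintro ⟨s, hs, hhit⟩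
      rcases List.suffix_cons_iff.mp hs with rfl | hs'
      · exact Or.inl hhit
      · exact Or.inr ⟨s, hs', hhit⟩

-- every phrase of A has some base phrase (lead ++ verb) as a prefix
theorem pvPhrase_has_base_prefix :
    ∀ p ∈ pvPhrasesA,
      (∃ v ∈ pvVerbsB, (pvWillB ++ v.toList) <+: p.toList) ∨
      (∃ v ∈ pvVerbsB, (pvHasB ++ v.toList) <+: p.toList) := by
  decide

-- every base phrase is itself a phrase of A
theorem pvWillBase_mem : ∀ v ∈ pvVerbsB, String.ofList (pvWillB ++ v.toList) ∈ pvPhrasesA := by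
  decide

theorem pvHasBase_mem : ∀ v ∈ pvVerbsB, String.ofList (pvHasB ++ v.toList) ∈ pvPhrasesA := by
  decide

-- ===== VERDICT (by name: the statement is the Claim_ definition above) =====
theorem contains_threatening_language_py_spec : Claim_equal_contains_threatening_language_py := by
  intro text _
  unfold Spec_contains_threatening_language_py
  unfold contains_threatening_language_py contains_threatening_language_py_alt
  rw [Bool.eq_iff_iff, pvScanB_iff]
  simp only [List.any_eq_true, PySem.Str.isIn_eq, PySem.Chars.isIn_iff_infix]
  set L := (PySem.Str.lower text).toList with hL
  constructor
  · rintro ⟨p, hp, hin⟩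
    rcases pvPhrase_has_base_prefix p hp with ⟨v, hv, hpref⟩ | ⟨v, hv, hpref⟩
    · obtain ⟨s, hps, hsl⟩ := List.infix_iff_prefix_suffix.mp (hpref.isInfix.trans hin)
      exact ⟨s, hsl, (pvHitB_iff s).mpr (Or.inl ⟨v, hv, hps⟩)⟩
    · obtain ⟨s, hps, hsl⟩ := List.infix_iff_prefix_suffix.mp (hpref.isInfix.trans hin)
      exact ⟨s, hsl, (pvHitB_iff s).mpr (Or.inr ⟨v, hv, hps⟩)⟩
  · rintro ⟨s, hs, hhit⟩
    rcases (pvHitB_iff s).mp hhit with ⟨v, hv, hpref⟩ | ⟨v, hv, hpref⟩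
    · refine ⟨String.ofList (pvWillB ++ v.toList), pvWillBase_mem v hv, ?_⟩
      rw [String.toList_ofList]
      exact List.infix_iff_prefix_suffix.mpr ⟨s, hpref, hs⟩
    · refine ⟨String.ofList (pvHasB ++ v.toList), pvHasBase_mem v hv, ?_⟩
      rw [String.toList_ofList]
      exact List.infix_iff_prefix_suffix.mpr ⟨s, hpref, hs⟩
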